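-- pv_equiv track=rewrite | github.com/anujdhillxn/functiondifferentiator | util.py | find_binary
-- ===== SOURCE A (Python) =====
-- BINARYS = ['^', '/', '*', '-', '+']
--
-- def get_priority(BINARY):
--     return BINARYS.index(BINARY)
--
-- def is_binary(character):
--     return BINARYS.count(character)
--
-- def find_binary(input):
--     open_brackets, BINARY_index, highest_priority = 0, -1, -1
--     for i in range(len(input)):
--         ch = input[i]
--         if(ch == '('):
--             open_brackets += 1
--         elif(ch == ')'):
--             open_brackets -= 1
--         else:
--             if(open_brackets == 0 and is_binary(ch) and highest_priority < get_priority(ch)):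
--                 BINARY_index, highest_priority = i, get_priority(ch)
--     if(open_brackets):
--         raise Exception("Not a valid Expression!")
--     return BINARY_index
-- ===== SOURCE B (Python) =====
-- BINARYS = ['^', '/', '*', '-', '+']
--
-- def find_binary(input):
--     # Phase 1: one pass computing the bracket depth before each character.
--     depth = 0
--     depths = []
--     for ch in input:
--         depths.append(depth)
--         if ch == '(':
--             depth += 1
--         elif ch == ')':
--             depth -= 1
--     if depth:
--         raise Exception("Not a valid Expression!")
--     # Phase 2: try operators from highest priority down; first depth-0 hit wins.
--     for op in '+-*/^':
--         for i, (ch, d) in enumerate(zip(input, depths)):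
--             if ch == op and d == 0:
--                 return i
--     return -1
-- ===== Notes on version B (the rewrite author's own statement) =====
-- stated objective: alternative
-- what changed: A's single pass with a running best-(index,priority) record is replaced by a two-phase scheme: one pass precomputes the bracket depth before each character (and the final balance for the validity check), then operators are tried from highest priority down, returning the first depth-0 occurrence of the highest priority present.
import Mathlib
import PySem

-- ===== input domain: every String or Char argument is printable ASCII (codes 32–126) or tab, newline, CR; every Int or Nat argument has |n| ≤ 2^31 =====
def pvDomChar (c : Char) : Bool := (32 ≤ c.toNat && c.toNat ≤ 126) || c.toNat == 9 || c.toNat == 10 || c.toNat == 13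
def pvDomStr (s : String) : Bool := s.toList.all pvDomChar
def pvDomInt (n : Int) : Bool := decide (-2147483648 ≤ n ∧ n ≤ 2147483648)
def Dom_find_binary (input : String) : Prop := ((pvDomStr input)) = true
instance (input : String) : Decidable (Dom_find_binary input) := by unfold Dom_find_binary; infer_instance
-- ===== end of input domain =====

-- B replaces A's one-pass running-best loop by a two-phase scheme (precomputed depth
-- list, then a highest-priority-first search); objective: alternative decomposition.

-- ===== PORT A =====
def pyBINARYS : List Char := ['^', '/', '*', '-', '+']

-- get_priority is only called on characters of pyBINARYS (guarded by is_binary), where index? is some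
def get_priority (c : Char) : Int := ((PySem.List.index? pyBINARYS c).getD 0 : Nat)

def is_binary (c : Char) : Int := (PySem.List.count pyBINARYS c : Nat)

def enumFrom {α : Type} : Nat → List α → List (Nat × α)
  | _, [] => []
  | i, c :: cs => (i, c) :: enumFrom (i + 1) cs

-- state (open_brackets, BINARY_index, highest_priority), branch for branch as in A
def fbA_loop : List (Nat × Char) → Int → Int → Int → Int × Int × Int
  | [], ob, bi, hp => (ob, bi, hp)
  | (i, ch) :: rest, ob, bi, hp =>
    if ch = '(' then fbA_loop rest (ob + 1) bi hp
    else if ch = ')' then fbA_loop rest (ob - 1) bi hp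
    else if ob = 0 ∧ is_binary ch ≠ 0 ∧ hp < get_priority ch then
      fbA_loop rest ob (i : Int) (get_priority ch)
    else fbA_loop rest ob bi hp

-- where open_brackets ≠ 0 the Python raises; Pre_ excludes those inputs, the port returns BINARY_index
def find_binary (input : String) : Int :=
  (fbA_loop (enumFrom 0 input.toList) 0 (-1) (-1)).2.1

-- ===== PORT B =====
-- phase 1: list of the bracket depth before each character, plus the final balance
def fbB_depths : List Char → Int → List Int → List Int × Int
  | [], d, ds => (ds, d)
  | ch :: rest, d, ds =>
    if ch = '(' then fbB_depths rest (d + 1) (ds ++ [d])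
    else if ch = ')' then fbB_depths rest (d - 1) (ds ++ [d])
    else fbB_depths rest d (ds ++ [d])

def fbB_scan (op : Char) : List (Nat × (Char × Int)) → Option Int
  | [] => none
  | (i, ch, d) :: rest => if ch = op ∧ d = 0 then some (i : Int) else fbB_scan op rest

def fbB_levels : List Char → List (Nat × (Char × Int)) → Int
  | [], _ => -1
  | op :: ops, pairs =>
    match fbB_scan op pairs with
    | some i => i
    | none => fbB_levels ops pairs

-- where the final depth is nonzero the Python raises; Pre_ excludes those inputs, the port runs phase 2 anyway
def find_binary_alt (input : String) : Int :=
  let cs := input.toList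
  let depths := (fbB_depths cs 0 []).1
  fbB_levels ['+', '-', '*', '/', '^'] (enumFrom 0 (cs.zip depths))

-- ===== PRECONDITION & SPEC =====
-- Pre_ excludes exactly the bracket-imbalanced strings, on which both Pythons raise the same validity Exception
def Pre_find_binary (input : String) : Prop :=
  input.toList.count '(' = input.toList.count ')'
instance (input : String) : Decidable (Pre_find_binary input) := by unfold Pre_find_binary; infer_instance

def pvWitness_find_binary : String := "a+b*(c-d)"

def Spec_find_binary (input : String) (out : Int) : Prop := out = find_binary_alt input
instance (input : String) (out : Int) : Decidable (Spec_find_binary input out) := by unfold Spec_find_binary; infer_instance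

-- ===== CLAIM (what is proved, stated in full; the proofs are below) =====
def Claim_equal_find_binary : Prop := ∀ (input : String), Dom_find_binary input → Pre_find_binary input → Spec_find_binary input (find_binary input)

-- ===== LEMMAS AND PROOFS =====

-- depth before each char, front to back
def depthsOf : List Char → Int → List Int
  | [], _ => []
  | ch :: rest, d =>
    d :: depthsOf rest (if ch = '(' then d + 1 else if ch = ')' then d - 1 else d)

def balOf : List Char → Int
  | [] => 0
  | ch :: rest => (if ch = '(' then 1 else if ch = ')' then -1 else 0) + balOf rest

-- the depth-0 binary-operator occurrences, in order
def candsOf : List Char → Nat → Int → List (Nat × Char)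
  | [], _, _ => []
  | ch :: rest, i, d =>
    if ch = '(' then candsOf rest (i + 1) (d + 1)
    else if ch = ')' then candsOf rest (i + 1) (d - 1)
    else if d = 0 ∧ is_binary ch ≠ 0 then (i, ch) :: candsOf rest (i + 1) d
    else candsOf rest (i + 1) d

-- A's record update, restricted to the candidate list
def foldA : List (Nat × Char) → Int → Int → Int × Int
  | [], bi, hp => (bi, hp)
  | (i, ch) :: rest, bi, hp =>
    if hp < get_priority ch then foldA rest (i : Int) (get_priority ch)
    else foldA rest bi hp

-- B's level-by-level search, restricted to the candidate list
def levelsFindD : List Char → List (Nat × Char) → Int → Int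
  | [], _, bi => bi
  | op :: ops, cs, bi =>
    match cs.find? (fun c => c.2 = op) with
    | some c => (c.1 : Int)
    | none => levelsFindD ops cs bi

-- the operators of priority strictly greater than hp, highest first
def opsGT (hp : Int) : List Char :=
  if hp < 0 then ['+', '-', '*', '/', '^']
  else if hp < 1 then ['+', '-', '*', '/']
  else if hp < 2 then ['+', '-', '*']
  else if hp < 3 then ['+', '-']
  else if hp < 4 then ['+']
  else []

lemma binary_cases {ch : Char} (h : is_binary ch ≠ 0) :
    ch = '^' ∨ ch = '/' ∨ ch = '*' ∨ ch = '-' ∨ ch = '+' := by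
  by_contra hc
  push_neg at hc
  obtain ⟨h1, h2, h3, h4, h5⟩ := hc
  apply h
  simp [is_binary, pyBINARYS, PySem.List.count, List.count_cons, List.count_nil,
    Ne.symm h1, Ne.symm h2, Ne.symm h3, Ne.symm h4, Ne.symm h5]

lemma candsOf_binary : ∀ (l : List Char) (i : Nat) (d : Int) (c : Nat × Char),
    c ∈ candsOf l i d → is_binary c.2 ≠ 0 := by
  intro l
  induction l with
  | nil => intro i d c hc; simp [candsOf] at hc
  | cons ch rest ih =>
    intro i d c hc
    unfold candsOf at hc
    split_ifs at hc with h1 h2 h3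
    · exact ih _ _ _ hc
    · exact ih _ _ _ hc
    · rcases List.mem_cons.mp hc with h | h
      · subst h; exact h3.2
      · exact ih _ _ _ h
    · exact ih _ _ _ hc

lemma levelsFindD_nil : ∀ (ops : List Char) (bi : Int), levelsFindD ops [] bi = bi := by
  intro ops bi
  induction ops with
  | nil => rfl
  | cons op ops ih => simp [levelsFindD, ih]

lemma levelsFindD_skip : ∀ (ops : List Char) (i : Nat) (ch : Char) (rest : List (Nat × Char)) (bi : Int),
    (∀ o ∈ ops, o ≠ ch) →
    levelsFindD ops ((i, ch) :: rest) bi = levelsFindD ops rest bi := by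
  intro ops
  induction ops with
  | nil => intro i ch rest bi _; rfl
  | cons op ops ih =>
    intro i ch rest bi h
    have hne : ¬ (ch = op) := fun e => (h op (by simp)) e.symm
    simp only [levelsFindD, List.find?_cons, hne, decide_false]
    rw [ih i ch rest bi (fun o ho => h o (by simp [ho]))]

lemma levelsFindD_hit : ∀ (ops1 : List Char) (ops2 : List Char) (i : Nat) (ch : Char)
    (rest : List (Nat × Char)) (bi : Int),
    (∀ o ∈ ops1, o ≠ ch) →
    levelsFindD (ops1 ++ ch :: ops2) ((i, ch) :: rest) bi = levelsFindD ops1 rest (i : Int) := by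
  intro ops1
  induction ops1 with
  | nil =>
    intro ops2 i ch rest bi _
    simp [levelsFindD, List.find?_cons]
  | cons op ops1 ih =>
    intro ops2 i ch rest bi h
    have hne : ¬ (ch = op) := fun e => (h op (by simp)) e.symm
    simp only [List.cons_append, levelsFindD, List.find?_cons, hne, decide_false]
    rw [ih ops2 i ch rest bi (fun o ho => h o (by simp [ho]))]

-- one cons step of the core equivalence, abstracted over the operator character
lemma cons_step (i : Nat) (ch : Char) (rest : List (Nat × Char)) (bi hp P : Int)
    (hP : get_priority ch = P) (hP0 : 0 ≤ P) (hP4 : P ≤ 4)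
    (hdec : ∀ hp', -1 ≤ hp' → hp' < P → ∃ t, opsGT hp' = opsGT P ++ ch :: t)
    (hne : ∀ hp', P ≤ hp' → hp' ≤ 4 → ∀ o ∈ opsGT hp', o ≠ ch)
    (ihrest : ∀ (bi hp' : Int), -1 ≤ hp' → hp' ≤ 4 →
      (foldA rest bi hp').1 = levelsFindD (opsGT hp') rest bi)
    (h1 : -1 ≤ hp) (h4 : hp ≤ 4) :
    (foldA ((i, ch) :: rest) bi hp).1 = levelsFindD (opsGT hp) ((i, ch) :: rest) bi := by
  unfold foldA
  rw [hP]
  by_cases hlt : hp < P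
  · obtain ⟨t, ht⟩ := hdec hp h1 hlt
    rw [if_pos hlt, ht, levelsFindD_hit _ _ _ _ _ _ (hne P le_rfl hP4)]
    exact ihrest (i : Int) P (by omega) hP4
  · rw [if_neg hlt, levelsFindD_skip _ _ _ _ _ (hne hp (by omega) h4)]
    exact ihrest bi hp h1 h4

set_option maxRecDepth 10000 in
lemma foldA_eq_levels : ∀ (cs : List (Nat × Char)),
    (∀ c ∈ cs, is_binary c.2 ≠ 0) →
    ∀ (bi hp : Int), -1 ≤ hp → hp ≤ 4 →
    (foldA cs bi hp).1 = levelsFindD (opsGT hp) cs bi := by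
  intro cs
  induction cs with
  | nil => intro _ bi hp _ _; simp [foldA, levelsFindD_nil]
  | cons c rest ih =>
    obtain ⟨i, ch⟩ := c
    intro hall bi hp h1 h4
    have hbin : is_binary ch ≠ 0 := hall (i, ch) (by simp)
    have hrest : ∀ c ∈ rest, is_binary c.2 ≠ 0 := fun c hc => hall c (by simp [hc])
    have ihrest := ih hrest
    rcases binary_cases hbin with h | h | h | h | h <;> subst h
    · refine cons_step i '^' rest bi hp 0 (by decide) (by norm_num) (by norm_num) ?_ ?_ ihrest h1 h4
      · intro hp' ha hb; interval_cases hp' <;> exact ⟨_, rfl⟩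
      · intro hp' ha hb; interval_cases hp' <;> norm_num [opsGT, List.forall_mem_cons] <;> decide
    · refine cons_step i '/' rest bi hp 1 (by decide) (by norm_num) (by norm_num) ?_ ?_ ihrest h1 h4
      · intro hp' ha hb; interval_cases hp' <;> exact ⟨_, rfl⟩
      · intro hp' ha hb; interval_cases hp' <;> norm_num [opsGT, List.forall_mem_cons] <;> decide
    · refine cons_step i '*' rest bi hp 2 (by decide) (by norm_num) (by norm_num) ?_ ?_ ihrest h1 h4
      · intro hp' ha hb; interval_cases hp' <;> exact ⟨_, rfl⟩
      · intro hp' ha hb; interval_cases hp' <;> norm_num [opsGT, List.forall_mem_cons] <;> decide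
    · refine cons_step i '-' rest bi hp 3 (by decide) (by norm_num) (by norm_num) ?_ ?_ ihrest h1 h4
      · intro hp' ha hb; interval_cases hp' <;> exact ⟨_, rfl⟩
      · intro hp' ha hb; interval_cases hp' <;> norm_num [opsGT, List.forall_mem_cons] <;> decide
    · refine cons_step i '+' rest bi hp 4 (by decide) (by norm_num) (by norm_num) ?_ ?_ ihrest h1 h4
      · intro hp' ha hb; interval_cases hp' <;> exact ⟨_, rfl⟩
      · intro hp' ha hb; interval_cases hp' <;> norm_num [opsGT, List.forall_mem_cons] <;> decide

-- step lemmas unfolding the loop bodies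
lemma fbA_open (i : Nat) (rest : List (Nat × Char)) (ob bi hp : Int) :
    fbA_loop ((i, '(') :: rest) ob bi hp = fbA_loop rest (ob + 1) bi hp := by
  simp [fbA_loop]

lemma fbA_close (i : Nat) (rest : List (Nat × Char)) (ob bi hp : Int) :
    fbA_loop ((i, ')') :: rest) ob bi hp = fbA_loop rest (ob - 1) bi hp := by
  simp [fbA_loop]

lemma fbA_other {ch : Char} (h1 : ch ≠ '(') (h2 : ch ≠ ')') (i : Nat)
    (rest : List (Nat × Char)) (ob bi hp : Int) :
    fbA_loop ((i, ch) :: rest) ob bi hp =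
      if ob = 0 ∧ is_binary ch ≠ 0 ∧ hp < get_priority ch then
        fbA_loop rest ob (i : Int) (get_priority ch)
      else fbA_loop rest ob bi hp := by
  simp [fbA_loop, h1, h2]

lemma candsOf_open (rest : List Char) (i : Nat) (d : Int) :
    candsOf ('(' :: rest) i d = candsOf rest (i + 1) (d + 1) := by simp [candsOf]

lemma candsOf_close (rest : List Char) (i : Nat) (d : Int) :
    candsOf (')' :: rest) i d = candsOf rest (i + 1) (d - 1) := by simp [candsOf]

lemma candsOf_other {ch : Char} (h1 : ch ≠ '(') (h2 : ch ≠ ')') (rest : List Char)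
    (i : Nat) (d : Int) :
    candsOf (ch :: rest) i d =
      if d = 0 ∧ is_binary ch ≠ 0 then (i, ch) :: candsOf rest (i + 1) d
      else candsOf rest (i + 1) d := by
  simp [candsOf, h1, h2]

lemma balOf_open (rest : List Char) : balOf ('(' :: rest) = 1 + balOf rest := by simp [balOf]

lemma balOf_close (rest : List Char) : balOf (')' :: rest) = -1 + balOf rest := by simp [balOf]

lemma balOf_other {ch : Char} (h1 : ch ≠ '(') (h2 : ch ≠ ')') (rest : List Char) :
    balOf (ch :: rest) = balOf rest := by simp [balOf, h1, h2]

lemma depthsOf_open (rest : List Char) (d : Int) :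
    depthsOf ('(' :: rest) d = d :: depthsOf rest (d + 1) := by simp [depthsOf]

lemma depthsOf_close (rest : List Char) (d : Int) :
    depthsOf (')' :: rest) d = d :: depthsOf rest (d - 1) := by simp [depthsOf]

lemma depthsOf_other {ch : Char} (h1 : ch ≠ '(') (h2 : ch ≠ ')') (rest : List Char) (d : Int) :
    depthsOf (ch :: rest) d = d :: depthsOf rest d := by simp [depthsOf, h1, h2]

-- A's loop over the enumerated string equals A's record fold over the candidate list
lemma fbA_eq : ∀ (l : List Char) (i : Nat) (ob bi hp : Int),
    fbA_loop (enumFrom i l) ob bi hp = (ob + balOf l, foldA (candsOf l i ob) bi hp) := by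
  intro l
  induction l with
  | nil => intro i ob bi hp; simp [enumFrom, fbA_loop, balOf, candsOf, foldA]
  | cons ch rest ih =>
    intro i ob bi hp
    simp only [enumFrom]
    by_cases h1 : ch = '('
    · subst h1
      rw [fbA_open, ih, candsOf_open, balOf_open]
      exact Prod.ext_iff.mpr ⟨by ring, rfl⟩
    · by_cases h2 : ch = ')'
      · subst h2
        rw [fbA_close, ih, candsOf_close, balOf_close]
        exact Prod.ext_iff.mpr ⟨by ring, rfl⟩
      · rw [fbA_other h1 h2, candsOf_other h1 h2, balOf_other h1 h2]
        by_cases h3 : ob = 0 ∧ is_binary ch ≠ 0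
        · rw [if_pos h3]
          unfold foldA
          by_cases h4 : hp < get_priority ch
          · rw [if_pos ⟨h3.1, h3.2, h4⟩, if_pos h4, ih]
          · rw [if_neg (fun hc => h4 hc.2.2), if_neg h4, ih]
        · rw [if_neg h3, if_neg (fun hc => h3 ⟨hc.1, hc.2.1⟩), ih]

-- B's phase 1 computes the prefix-depth list and the final balance
lemma fbB_depths_eq : ∀ (l : List Char) (d : Int) (ds : List Int),
    fbB_depths l d ds = (ds ++ depthsOf l d, d + balOf l) := by
  intro l
  induction l with
  | nil => intro d ds; simp [fbB_depths, depthsOf, balOf]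
  | cons ch rest ih =>
    intro d ds
    by_cases h1 : ch = '('
    · subst h1
      show fbB_depths rest (d + 1) (ds ++ [d]) = _
      rw [ih, depthsOf_open, balOf_open]
      exact Prod.ext_iff.mpr ⟨by simp, by ring⟩
    · by_cases h2 : ch = ')'
      · subst h2
        show fbB_depths rest (d - 1) (ds ++ [d]) = _
        rw [ih, depthsOf_close, balOf_close]
        exact Prod.ext_iff.mpr ⟨by simp, by ring⟩
      · have : fbB_depths (ch :: rest) d ds = fbB_depths rest d (ds ++ [d]) := by
          simp [fbB_depths, h1, h2]
        rw [this, ih, depthsOf_other h1 h2, balOf_other h1 h2]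
        simp

-- B's scan for one operator is the first matching candidate
lemma scan_eq : ∀ (l : List Char) (i : Nat) (d : Int) (op : Char), is_binary op ≠ 0 →
    fbB_scan op (enumFrom i (l.zip (depthsOf l d))) =
      ((candsOf l i d).find? (fun c => c.2 = op)).map (fun c => (c.1 : Int)) := by
  intro l
  induction l with
  | nil => intro i d op _; simp [depthsOf, enumFrom, fbB_scan, candsOf]
  | cons ch rest ih =>
    intro i d op hop
    have hopne : op ≠ '(' ∧ op ≠ ')' := by
      rcases binary_cases hop with h | h | h | h | h <;> subst h <;> exact ⟨by decide, by decide⟩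
    by_cases h1 : ch = '('
    · subst h1
      rw [depthsOf_open, candsOf_open]
      simp only [List.zip_cons_cons, enumFrom]
      unfold fbB_scan
      rw [if_neg (fun hc => hopne.1 hc.1.symm)]
      exact ih _ _ op hop
    · by_cases h2 : ch = ')'
      · subst h2
        rw [depthsOf_close, candsOf_close]
        simp only [List.zip_cons_cons, enumFrom]
        unfold fbB_scan
        rw [if_neg (fun hc => hopne.2 hc.1.symm)]
        exact ih _ _ op hop
      · rw [depthsOf_other h1 h2, candsOf_other h1 h2]
        simp only [List.zip_cons_cons, enumFrom]
        unfold fbB_scan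
        by_cases h3 : d = 0 ∧ is_binary ch ≠ 0
        · rw [if_pos h3]
          by_cases h4 : ch = op
          · rw [if_pos ⟨h4, h3.1⟩, List.find?_cons_of_pos (by simp [h4])]
            rfl
          · rw [if_neg (fun hc => h4 hc.1), List.find?_cons_of_neg (by simp [h4])]
            exact ih _ _ op hop
        · have hcond : ¬ (ch = op ∧ d = 0) := by
            rintro ⟨he, hd⟩
            exact h3 ⟨hd, he ▸ hop⟩
          rw [if_neg h3, if_neg hcond]
          exact ih _ _ op hop

-- B's phase 2 is the level-by-level search over the candidate list
lemma levels_eq : ∀ (ops : List Char) (l : List Char) (i : Nat) (d : Int),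
    (∀ op ∈ ops, is_binary op ≠ 0) →
    fbB_levels ops (enumFrom i (l.zip (depthsOf l d))) = levelsFindD ops (candsOf l i d) (-1) := by
  intro ops
  induction ops with
  | nil => intro l i d _; rfl
  | cons op ops ih =>
    intro l i d h
    unfold fbB_levels levelsFindD
    rw [scan_eq l i d op (h op (by simp))]
    rcases hf : (candsOf l i d).find? (fun c => c.2 = op) with _ | c
    · rw [hf]
      simp only [Option.map_none]
      exact ih l i d (fun o ho => h o (by simp [ho]))
    · rw [hf]
      simp only [Option.map_some]

-- ===== VERDICT (by name: the statement is the Claim_ definition above) =====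
set_option maxRecDepth 10000 in
theorem find_binary_spec : Claim_equal_find_binary := by
  intro input _ _
  have hB : find_binary_alt input
      = levelsFindD ['+', '-', '*', '/', '^'] (candsOf input.toList 0 0) (-1) := by
    show fbB_levels ['+', '-', '*', '/', '^']
        (enumFrom 0 (input.toList.zip (fbB_depths input.toList 0 []).1)) = _
    rw [fbB_depths_eq]
    simp only [List.nil_append]
    exact levels_eq _ _ _ _ (by intro o ho; fin_cases ho <;> decide)
  have hA : find_binary input = (foldA (candsOf input.toList 0 0) (-1) (-1)).1 := by
    show (fbA_loop (enumFrom 0 input.toList) 0 (-1) (-1)).2.1 = _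
    rw [fbA_eq]
  show find_binary input = find_binary_alt input
  rw [hA, hB]
  have hC := foldA_eq_levels (candsOf input.toList 0 0)
    (candsOf_binary input.toList 0 0) (-1) (-1) (by norm_num) (by norm_num)
  rw [show opsGT (-1) = ['+', '-', '*', '/', '^'] from rfl] at hC
  exact hC
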